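-- pv_equiv track=rewrite | github.com/Hamster-Furtif/Fluff-Plus-Plus | FppToCasio.py | asGoesFirst
-- ===== SOURCE A (Python) =====
-- def asGoesFirst(groups): #put the groups containing "as" at the top of the queue
--     temp = []
--     for g in groups:
--         if("as" in g):
--             temp.insert(0, g)
--         else:
--             temp.append(g)
--     return temp
-- ===== SOURCE B (Python) =====
-- def asGoesFirst(groups):  # single pass into two lists; as-groups reversed go first
--     front = []
--     back = []
--     for g in groups:
--         if "as" in g:
--             front.append(g)
--         else:
--             back.append(g)
--     return list(reversed(front)) + back
-- ===== Notes on version B (the rewrite author's own statement) =====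
-- stated objective: simpler
-- what changed: Replaced the loop that interleaves temp.insert(0, g) and temp.append(g) on one list by a single-pass partition into two append-only lists, returning reversed as-groups followed by the rest.
import Mathlib
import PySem

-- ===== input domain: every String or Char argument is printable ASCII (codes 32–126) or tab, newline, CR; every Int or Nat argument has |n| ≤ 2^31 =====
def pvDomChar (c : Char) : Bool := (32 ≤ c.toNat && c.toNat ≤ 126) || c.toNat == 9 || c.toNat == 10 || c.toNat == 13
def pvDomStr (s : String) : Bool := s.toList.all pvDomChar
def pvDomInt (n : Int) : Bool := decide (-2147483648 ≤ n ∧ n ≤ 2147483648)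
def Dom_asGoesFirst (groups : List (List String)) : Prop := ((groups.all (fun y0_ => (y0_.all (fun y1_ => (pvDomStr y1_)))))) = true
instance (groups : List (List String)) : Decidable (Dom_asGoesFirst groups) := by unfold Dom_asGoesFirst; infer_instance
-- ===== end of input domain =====

-- B partitions in one pass into two append-only lists instead of A's mixed insert(0,g)/append loop; simpler.


-- ===== PORT A =====
-- temp = []; for g: if "as" in g: temp.insert(0,g) else temp.append(g)
def asGoesFirst (groups : List (List String)) : List (List String) :=
  groups.foldl (fun temp g => if g.contains "as" then g :: temp else temp ++ [g]) []

-- ===== PORT B =====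
-- one pass into two accumulators (front, back), then list(reversed(front)) + back
def asGoesFirst_alt (groups : List (List String)) : List (List String) :=
  let fb := groups.foldl
      (fun (fb : List (List String) × List (List String)) g =>
        if g.contains "as" then (fb.1 ++ [g], fb.2) else (fb.1, fb.2 ++ [g]))
      ([], [])
  fb.1.reverse ++ fb.2

-- ===== PRECONDITION & SPEC =====
def Spec_asGoesFirst (groups : List (List String)) (out : List (List String)) : Prop := out = asGoesFirst_alt groups
instance (groups : List (List String)) (out : List (List String)) : Decidable (Spec_asGoesFirst groups out) := by unfold Spec_asGoesFirst; infer_instance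

-- ===== CLAIM (what is proved, stated in full; the proofs are below) =====
def Claim_equal_asGoesFirst : Prop := ∀ (groups : List (List String)), Dom_asGoesFirst groups → Spec_asGoesFirst groups (asGoesFirst groups)

-- ===== LEMMAS AND PROOFS =====

theorem pv_a_inv (gs : List (List String)) (temp : List (List String)) :
    gs.foldl (fun temp g => if "as" ∈ g then g :: temp else temp ++ [g]) temp
      = (gs.filter (fun g => decide ("as" ∈ g))).reverse ++ temp
        ++ gs.filter (fun g => !decide ("as" ∈ g)) := by
  induction gs generalizing temp with
  | nil => simp
  | cons g gs ih =>
    by_cases h : "as" ∈ g <;> simp [h, ih]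

theorem pv_b_inv (gs : List (List String)) (f b : List (List String)) :
    gs.foldl (fun (fb : List (List String) × List (List String)) g =>
        if "as" ∈ g then (fb.1 ++ [g], fb.2) else (fb.1, fb.2 ++ [g])) (f, b)
      = (f ++ gs.filter (fun g => decide ("as" ∈ g)),
         b ++ gs.filter (fun g => !decide ("as" ∈ g))) := by
  induction gs generalizing f b with
  | nil => simp
  | cons g gs ih =>
    by_cases h : "as" ∈ g <;> simp [h, ih]

-- ===== VERDICT (by name: the statement is the Claim_ definition above) =====
theorem asGoesFirst_spec : Claim_equal_asGoesFirst := by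
  intro groups _
  unfold Spec_asGoesFirst asGoesFirst asGoesFirst_alt
  simp [pv_a_inv, pv_b_inv]
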